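-- pv_equiv track=rewrite | github.com/ShingenTakeda/Estacionamento | Estacionamento.py | SearchState
-- ===== SOURCE A (Python) =====
-- brasil = {
--     "Mato Grosso do Sul": [["HQF", "HTW"], ["NRF", "NSD"], ["OOG", "OOU"], ["QAA", "QAZ"], ["REW", "REZ"], ["RWA", "RWJ"]],
--     "Mato Grosso":[["JXZ", "KAU"], ["NIY", "NJW"], ["NPC", "NPQ"], ["NTX", "NUG"], ["OAP", "OBS"], ["QBA", "QCZ"], ["RAK", "RAZ"], ["RI", "RRZ"]],
--     "Tocantins":[["MVL", "MXG"], ["OLH", "OLN"], ["OYA", "OYC"], ["QKA", "QKM"], ["QWA", "QWF"], ["RSA", "RSF"]]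
-- }
--
-- alf="ABCDEFGHIJKLMNOPQRSTUVWXYZ"
--
-- def Convert(string):
--     total = 0
--     posicao = len(string)-1
--     for i in string:
--         total+=alf.index(i)
--         len(alf)*posicao
--         posicao -= 1
--     return total
--
-- def SearchState(plaque):
--     value = Convert(plaque[:3])
--     for state in brasil:
--         for limit in brasil[state]:
--             min_value, max_value = Convert(limit[0]), Convert(limit[1])
--             if min_value <= value <= max_value:
--                 return state
--     return None
-- ===== SOURCE B (Python) =====
-- brasil = {
--     "Mato Grosso do Sul": [["HQF", "HTW"], ["NRF", "NSD"], ["OOG", "OOU"], ["QAA", "QAZ"], ["REW", "REZ"], ["RWA", "RWJ"]],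
--     "Mato Grosso":[["JXZ", "KAU"], ["NIY", "NJW"], ["NPC", "NPQ"], ["NTX", "NUG"], ["OAP", "OBS"], ["QBA", "QCZ"], ["RAK", "RAZ"], ["RI", "RRZ"]],
--     "Tocantins":[["MVL", "MXG"], ["OLH", "OLN"], ["OYA", "OYC"], ["QKA", "QKM"], ["QWA", "QWF"], ["RSA", "RSF"]]
-- }
--
-- alf = "ABCDEFGHIJKLMNOPQRSTUVWXYZ"
--
-- def _convert(s):
--     return sum(alf.index(c) for c in s)
--
-- def _build_table():
--     # precompute sum -> state once, first match in iteration order wins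
--     table = {}
--     for state, limits in brasil.items():
--         for lo, hi in limits:
--             for v in range(_convert(lo), _convert(hi) + 1):
--                 if v not in table:
--                     table[v] = state
--     return table
--
-- _TABLE = _build_table()
--
-- def SearchState(plaque):
--     return _TABLE.get(_convert(plaque[:3]))
-- ===== Notes on version B (the rewrite author's own statement) =====
-- stated objective: simpler
-- what changed: B precomputes once a dict mapping each possible letter-sum to its first-matching state (first-wins fill over the ranges) and SearchState becomes a single dict lookup, replacing A's per-call nested scan over all states and limits with repeated Convert calls.
import Mathlib
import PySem

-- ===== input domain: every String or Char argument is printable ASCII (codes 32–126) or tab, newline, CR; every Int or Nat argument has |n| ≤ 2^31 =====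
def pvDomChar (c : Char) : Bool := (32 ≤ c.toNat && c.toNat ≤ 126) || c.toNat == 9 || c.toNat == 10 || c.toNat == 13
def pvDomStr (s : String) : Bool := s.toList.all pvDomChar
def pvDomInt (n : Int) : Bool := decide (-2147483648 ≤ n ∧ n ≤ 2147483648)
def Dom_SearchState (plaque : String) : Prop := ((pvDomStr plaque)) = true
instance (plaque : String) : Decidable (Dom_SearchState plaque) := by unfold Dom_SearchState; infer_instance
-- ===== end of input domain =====

-- B replaces A's per-call nested scan over all states/limits by a dict, built once,
-- mapping each possible letter-sum to its first-matching state; lookup is then a single get.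

-- ===== PORT A =====
def alf : List Char := "ABCDEFGHIJKLMNOPQRSTUVWXYZ".toList

def brasil : List (String × List (String × String)) :=
  [("Mato Grosso do Sul", [("HQF","HTW"),("NRF","NSD"),("OOG","OOU"),("QAA","QAZ"),("REW","REZ"),("RWA","RWJ")]),
   ("Mato Grosso", [("JXZ","KAU"),("NIY","NJW"),("NPC","NPQ"),("NTX","NUG"),("OAP","OBS"),("QBA","QCZ"),("RAK","RAZ"),("RI","RRZ")]),
   ("Tocantins", [("MVL","MXG"),("OLH","OLN"),("OYA","OYC"),("QKA","QKM"),("QWA","QWF"),("RSA","RSF")])]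

-- Convert: the loop keeps (total, posicao); the statement `len(alf)*posicao` discards its value
-- and is dropped; none = ValueError from alf.index (excluded by Pre_)
def stepA (acc : Option (Int × Int)) (c : Char) : Option (Int × Int) :=
  match acc with
  | none => none
  | some (total, posicao) =>
    match PySem.List.index? alf c with
    | none => none
    | some i => some (total + (i : Int), posicao - 1)

def ConvertA (s : List Char) : Option Int :=
  (s.foldl stepA (some ((0 : Int), (s.length : Int) - 1))).map (·.1)

-- inner `for limit in brasil[state]` with early return; the limit strings of the literal data
-- are all uppercase letters, so the ConvertA calls on them always succeed (the `_, _` arm is dead)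
def limitLoopA (value : Int) (state : String) : List (String × String) → Option String
  | [] => none
  | (lo, hi) :: rest =>
    match ConvertA lo.toList, ConvertA hi.toList with
    | some mn, some mx =>
        if mn ≤ value ∧ value ≤ mx then some state else limitLoopA value state rest
    | _, _ => none

-- outer `for state in brasil` with early return
def stateLoopA (value : Int) : List (String × List (String × String)) → Option String
  | [] => none
  | (state, limits) :: rest =>
    match limitLoopA value state limits with
    | some s => some s
    | none => stateLoopA value rest

def SearchState (plaque : String) : Option String :=
  match ConvertA (PySem.List.slice plaque.toList none (some 3)) with
  | none => none   -- ValueError in Python; outside Pre_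
  | some value => stateLoopA value brasil

-- ===== PORT B =====
-- _convert: sum(alf.index(c) for c in s); none = ValueError
def stepB (acc : Option Int) (c : Char) : Option Int :=
  match acc with
  | none => none
  | some t =>
    match PySem.List.index? alf c with
    | none => none
    | some i => some (t + (i : Int))

def ConvertB (s : List Char) : Option Int :=
  s.foldl stepB (some (0 : Int))

-- _build_table: first-wins fill of sum -> state, built once
def tableB : PySem.Dict Int String :=
  brasil.foldl (fun d p =>
    p.2.foldl (fun d lim =>
      match ConvertB lim.1.toList, ConvertB lim.2.toList with
      | some lo, some hi =>
          (PySem.List.pyRange lo (hi + 1) 1).foldl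
            (fun d v => if d.contains v then d else d.insert v p.1) d
      | _, _ => d) d)
    PySem.Dict.empty

def SearchState_alt (plaque : String) : Option String :=
  match ConvertB (PySem.List.slice plaque.toList none (some 3)) with
  | none => none   -- ValueError in Python; outside Pre_
  | some v => tableB.get? v

-- ===== PRECONDITION & SPEC =====
-- Pre_ excludes exactly the inputs on which Python A raises ValueError: a character of
-- plaque[:3] that is not an uppercase A–Z letter (alf.index raises there; B raises too).
def Pre_SearchState (plaque : String) : Prop :=
  ((plaque.toList.take 3).all (fun c => alf.contains c)) = true
instance (plaque : String) : Decidable (Pre_SearchState plaque) := by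
  unfold Pre_SearchState; infer_instance

def pvWitness_SearchState : String := "HRA"

def Spec_SearchState (plaque : String) (out : Option String) : Prop := out = SearchState_alt plaque
instance (plaque : String) (out : Option String) : Decidable (Spec_SearchState plaque out) := by unfold Spec_SearchState; infer_instance

-- ===== CLAIM (what is proved, stated in full; the proofs are below) =====
def Claim_equal_SearchState : Prop := ∀ (plaque : String), Dom_SearchState plaque → Pre_SearchState plaque → Spec_SearchState plaque (SearchState plaque)

-- ===== LEMMAS AND PROOFS =====

theorem foldl_stepnone {beta : Type} (f : Option beta → Char → Option beta)
    (hf : ∀ c, f none c = none) (s : List Char) : s.foldl f none = none := by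
  induction s with
  | nil => rfl
  | cons c s ih => rw [List.foldl_cons, hf]; exact ih

theorem fold_AB (s : List Char) : ∀ (t p : Int),
    (s.foldl stepA (some (t, p))).map (·.1) = s.foldl stepB (some t) := by
  induction s with
  | nil => intro t p; rfl
  | cons c s ih =>
    intro t p
    simp only [List.foldl_cons]
    cases h : PySem.List.index? alf c with
    | none =>
      have hA : stepA (some (t, p)) c = none := by unfold stepA; rw [h]
      have hB : stepB (some t) c = none := by unfold stepB; rw [h]
      rw [hA, hB, foldl_stepnone stepA (fun c => rfl), foldl_stepnone stepB (fun c => rfl)]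
      rfl
    | some i =>
      have hA : stepA (some (t, p)) c = some (t + (i : Int), p - 1) := by unfold stepA; rw [h]
      have hB : stepB (some t) c = some (t + (i : Int)) := by unfold stepB; rw [h]
      rw [hA, hB]
      exact ih (t + (i : Int)) (p - 1)

theorem convert_AB (s : List Char) : ConvertA s = ConvertB s :=
  fold_AB s 0 ((s.length : Int) - 1)

theorem foldB_bound (s : List Char) : ∀ (t v : Int),
    s.foldl stepB (some t) = some v → t ≤ v ∧ v ≤ t + 25 * s.length := by
  induction s with
  | nil => intro t v h; simp at h; omega
  | cons c s ih =>
    intro t v h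
    simp only [List.foldl_cons] at h
    cases hidx : PySem.List.index? alf c with
    | none =>
      have hB : stepB (some t) c = none := by unfold stepB; rw [hidx]
      rw [hB, foldl_stepnone stepB (fun c => rfl)] at h
      exact absurd h (by simp)
    | some i =>
      have hB : stepB (some t) c = some (t + (i : Int)) := by unfold stepB; rw [hidx]
      rw [hB] at h
      obtain ⟨hk, _, _⟩ := PySem.List.getElem_of_index?_eq_some hidx
      have hlen : alf.length = 26 := by decide
      have := ih (t + (i : Int)) v h
      simp only [List.length_cons]
      have hi : (i : Int) ≤ 25 := by exact_mod_cast Nat.lt_succ_iff.mp (by omega)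
      push_cast at this ⊢
      omega

set_option maxRecDepth 100000 in
set_option maxHeartbeats 4000000 in
theorem loop_eq_table : ∀ n : Fin 76, stateLoopA (n : Int) brasil = tableB.get? (n : Int) := by
  decide

theorem core_eq (v : Int) (h0 : 0 ≤ v) (h75 : v ≤ 75) :
    stateLoopA v brasil = tableB.get? v := by
  lift v to ℕ using h0
  have hv : v < 76 := by exact_mod_cast Int.lt_add_one_iff.mpr h75
  exact loop_eq_table ⟨v, hv⟩

-- ===== VERDICT (by name: the statement is the Claim_ definition above) =====
theorem SearchState_spec : Claim_equal_SearchState := by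
  intro plaque _ _
  unfold Spec_SearchState SearchState SearchState_alt
  rw [convert_AB]
  cases h : ConvertB (PySem.List.slice plaque.toList none (some 3)) with
  | none => rfl
  | some v =>
    have hb := foldB_bound (PySem.List.slice plaque.toList none (some 3)) 0 v h
    have hlen : (PySem.List.slice plaque.toList none (some 3)).length ≤ 3 := by
      rw [show ((3 : Int)) = ((3 : Nat) : Int) from rfl, PySem.List.slice_to_natCast]
      simp
    exact core_eq v (by omega) (by omega)
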